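-- pv_equiv track=rewrite | github.com/EmilProkopov/GARCH | src/dataSetSplitting.py | sliceByTimestamps
-- ===== SOURCE A (Python) =====
-- def sliceByTimestamps(timestamps, values, timestampFrom, timestampTo):
--     allIndexes = list(range(len(timestamps)))
--
--     def timestampFilter(x):
--         return (x >= timestampFrom) and (x < timestampTo)
--
--     resTimestamps = [timestamps[i] for i in allIndexes
--                      if timestampFilter(timestamps[i])]
--
--     resValues = [values[i] for i in allIndexes
--                  if timestampFilter(timestamps[i])]
--
--     return (resTimestamps, resValues)
-- ===== SOURCE B (Python) =====
-- def sliceByTimestamps(timestamps, values, timestampFrom, timestampTo):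
--     resTimestamps = []
--     resValues = []
--     for ts, v in zip(timestamps, values):
--         if timestampFrom <= ts < timestampTo:
--             resTimestamps.append(ts)
--             resValues.append(v)
--     return (resTimestamps, resValues)
-- ===== Notes on version B (the rewrite author's own statement) =====
-- stated objective: simpler
-- what changed: A builds an explicit index list and runs two separate filtered index-comprehensions (evaluating the filter twice per element); B makes one fused pass over zip(timestamps, values), appending to both result lists at once.
import Mathlib
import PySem

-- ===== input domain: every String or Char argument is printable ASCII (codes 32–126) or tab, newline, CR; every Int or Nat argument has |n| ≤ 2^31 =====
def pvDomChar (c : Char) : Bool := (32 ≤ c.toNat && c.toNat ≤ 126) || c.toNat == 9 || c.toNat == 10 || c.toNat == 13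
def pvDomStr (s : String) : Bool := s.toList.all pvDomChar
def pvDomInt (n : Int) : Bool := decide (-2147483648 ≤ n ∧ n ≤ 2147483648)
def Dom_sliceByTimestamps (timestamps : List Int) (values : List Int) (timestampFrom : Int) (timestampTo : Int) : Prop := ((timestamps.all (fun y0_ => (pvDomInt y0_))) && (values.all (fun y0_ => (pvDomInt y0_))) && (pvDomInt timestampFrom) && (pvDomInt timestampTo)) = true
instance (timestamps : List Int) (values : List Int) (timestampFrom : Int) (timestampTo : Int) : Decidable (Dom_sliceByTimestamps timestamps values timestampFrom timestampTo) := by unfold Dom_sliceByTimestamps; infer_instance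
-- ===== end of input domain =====

-- B replaces A's two index-comprehension passes (over an explicit index list) by one fused pass over zip(timestamps, values); objective: simpler.

-- ===== PORT A =====
-- timestampFilter(x)
def pvFilter (timestampFrom timestampTo x : Int) : Bool :=
  decide (x ≥ timestampFrom) && decide (x < timestampTo)

def sliceByTimestamps (timestamps : List Int) (values : List Int) (timestampFrom : Int) (timestampTo : Int) : List Int × List Int :=
  let allIndexes := PySem.List.pyRange 0 (timestamps.length : Int) 1
  let resTimestamps := allIndexes.foldl (fun acc i =>
    if pvFilter timestampFrom timestampTo (PySem.List.pyGetD timestamps i 0)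
    then acc ++ [PySem.List.pyGetD timestamps i 0] else acc) []
  let resValues := allIndexes.foldl (fun acc i =>
    if pvFilter timestampFrom timestampTo (PySem.List.pyGetD timestamps i 0)
    then acc ++ [PySem.List.pyGetD values i 0] else acc) []
  (resTimestamps, resValues)

-- ===== PORT B =====
def sliceByTimestamps_alt (timestamps : List Int) (values : List Int) (timestampFrom : Int) (timestampTo : Int) : List Int × List Int :=
  (timestamps.zip values).foldl (fun acc p =>
    if timestampFrom ≤ p.1 ∧ p.1 < timestampTo
    then (acc.1 ++ [p.1], acc.2 ++ [p.2]) else acc) ([], [])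

-- ===== PRECONDITION & SPEC =====
-- Pre_ excludes exactly the inputs where Python A raises IndexError: some timestamp passes the
-- filter at an index beyond the end of `values` (then `values[i]` raises).
def Pre_sliceByTimestamps (timestamps : List Int) (values : List Int) (timestampFrom : Int) (timestampTo : Int) : Prop :=
  ∀ i < timestamps.length, (timestampFrom ≤ timestamps.getD i 0 ∧ timestamps.getD i 0 < timestampTo) → i < values.length
instance (timestamps : List Int) (values : List Int) (timestampFrom : Int) (timestampTo : Int) : Decidable (Pre_sliceByTimestamps timestamps values timestampFrom timestampTo) := by unfold Pre_sliceByTimestamps; infer_instance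
def pvWitness_sliceByTimestamps : List Int × List Int × Int × Int := ([1, 5, 3], [10, 20, 30], 1, 4)
def Spec_sliceByTimestamps (timestamps : List Int) (values : List Int) (timestampFrom : Int) (timestampTo : Int) (out : List Int × List Int) : Prop := out = sliceByTimestamps_alt timestamps values timestampFrom timestampTo
instance (timestamps : List Int) (values : List Int) (timestampFrom : Int) (timestampTo : Int) (out : List Int × List Int) : Decidable (Spec_sliceByTimestamps timestamps values timestampFrom timestampTo out) := by unfold Spec_sliceByTimestamps; infer_instance

-- ===== CLAIM (what is proved, stated in full; the proofs are below) =====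
def Claim_equal_sliceByTimestamps : Prop := ∀ (timestamps : List Int) (values : List Int) (timestampFrom : Int) (timestampTo : Int), Dom_sliceByTimestamps timestamps values timestampFrom timestampTo → Pre_sliceByTimestamps timestamps values timestampFrom timestampTo → Spec_sliceByTimestamps timestamps values timestampFrom timestampTo (sliceByTimestamps timestamps values timestampFrom timestampTo)

-- ===== LEMMAS AND PROOFS =====

-- B's fused loop, characterized: both accumulators extend by the zip filtered on the first component
theorem pvB_char (f t : Int) (l : List (Int × Int)) (a b : List Int) :
    l.foldl (fun acc p => if f ≤ p.1 ∧ p.1 < t then (acc.1 ++ [p.1], acc.2 ++ [p.2]) else acc) (a, b) =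
      (a ++ (l.filter (fun p => decide (f ≤ p.1 ∧ p.1 < t))).map Prod.fst,
       b ++ (l.filter (fun p => decide (f ≤ p.1 ∧ p.1 < t))).map Prod.snd) := by
  induction l generalizing a b with
  | nil => simp
  | cons p l ih =>
      by_cases hp : f ≤ p.1 ∧ p.1 < t
      · simp [hp, ih, List.append_assoc]
      · simp [hp, ih]

theorem range_getD_self (l : List Int) :
    (List.range l.length).map (fun i => l.getD i 0) = l := by
  apply List.ext_getElem; · simp
  intro i h1 h2; simp [List.getElem?_eq_getElem h2]

theorem pvA_char (ts vs : List Int) (f t : Int) :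
    sliceByTimestamps ts vs f t =
      (ts.filter (pvFilter f t),
       ((List.range ts.length).filter (fun i => pvFilter f t (ts.getD i 0))).map
         (fun i => vs.getD i 0)) := by
  simp only [sliceByTimestamps]
  rw [PySem.List.foldl_append_if, PySem.List.foldl_append_if, PySem.List.pyRange_one]
  simp only [List.filter_map, List.map_map, Int.sub_zero, Int.toNat_natCast, List.nil_append]
  have hP : List.filter ((fun i => pvFilter f t (PySem.List.pyGetD ts i 0)) ∘ fun k : Nat => (0:Int) + (k:Int)) (List.range ts.length)
      = List.filter (fun i => pvFilter f t (ts.getD i 0)) (List.range ts.length) :=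
    List.filter_congr (fun i _ => by simp [Function.comp])
  have hT : List.map ((fun i => PySem.List.pyGetD ts i 0) ∘ fun k : Nat => (0:Int) + (k:Int))
        (List.filter (fun i => pvFilter f t (ts.getD i 0)) (List.range ts.length))
      = List.map (fun i => ts.getD i 0)
        (List.filter (fun i => pvFilter f t (ts.getD i 0)) (List.range ts.length)) :=
    List.map_congr_left (fun i _ => by simp [Function.comp])
  have hV : List.map ((fun i => PySem.List.pyGetD vs i 0) ∘ fun k : Nat => (0:Int) + (k:Int))
        (List.filter (fun i => pvFilter f t (ts.getD i 0)) (List.range ts.length))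
      = List.map (fun i => vs.getD i 0)
        (List.filter (fun i => pvFilter f t (ts.getD i 0)) (List.range ts.length)) :=
    List.map_congr_left (fun i _ => by simp [Function.comp])
  rw [hP, hT, hV]
  have hcomp : (fun i => pvFilter f t (ts.getD i 0)) = (pvFilter f t) ∘ (fun i : Nat => ts.getD i 0) := rfl
  refine Prod.ext ?_ ?_
  · show List.map (fun i => ts.getD i 0) _ = _
    rw [hcomp, ← List.filter_map, range_getD_self]
  · rfl

theorem pvMain (f t : Int) : ∀ (ts vs : List Int),
    (∀ i < ts.length, (f ≤ ts.getD i 0 ∧ ts.getD i 0 < t) → i < vs.length) →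
    (ts.filter (pvFilter f t),
     ((List.range ts.length).filter (fun i => pvFilter f t (ts.getD i 0))).map (fun i => vs.getD i 0)) =
    (((ts.zip vs).filter (fun p => decide (f ≤ p.1 ∧ p.1 < t))).map Prod.fst,
     ((ts.zip vs).filter (fun p => decide (f ≤ p.1 ∧ p.1 < t))).map Prod.snd) := by
  intro ts
  induction ts with
  | nil => intro vs _; simp
  | cons x ts ih =>
    intro vs hpre
    have hfe : ∀ y : Int, pvFilter f t y = decide (f ≤ y ∧ y < t) := by
      intro y; simp [pvFilter, ge_iff_le]
    match vs with
    | [] =>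
        have hx : ¬ (f ≤ x ∧ x < t) := fun h =>
          absurd (hpre 0 (by simp) (by simpa using h)) (by simp)
        have hall : ∀ i < ts.length, ¬ (f ≤ ts.getD i 0 ∧ ts.getD i 0 < t) := fun i hi h =>
          absurd (hpre (i + 1) (by simpa using hi) (by simpa using h)) (by simp)
        have h1 : (x :: ts).filter (pvFilter f t) = [] := by
          rw [List.filter_eq_nil_iff]
          intro y hy
          rcases List.mem_cons.mp hy with rfl | hy'
          · simp only [hfe, decide_eq_true_eq]; exact hx
          · obtain ⟨i, hi, rfl⟩ := List.getElem_of_mem hy'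
            have := hall i hi
            rw [List.getD_eq_getElem ts 0 hi] at this
            simp only [hfe, decide_eq_true_eq]; exact this
        have h2 : (List.range (x :: ts).length).filter
            (fun i => pvFilter f t ((x :: ts).getD i 0)) = [] := by
          rw [List.filter_eq_nil_iff]
          intro i hi
          rw [List.mem_range, List.length_cons] at hi
          match i with
          | 0 => simp only [List.getD_cons_zero, hfe, decide_eq_true_eq]; exact hx
          | i + 1 =>
              simp only [List.getD_cons_succ, hfe, decide_eq_true_eq]
              exact hall i (by omega)
        have hz : (x :: ts).zip ([] : List Int) = [] := List.zip_nil_right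
        refine Prod.ext ?_ ?_
        · simp only [hz, List.filter_nil, List.map_nil]; exact h1
        · simp only [hz, List.filter_nil, List.map_nil]; rw [h2]; rfl
    | v :: vs =>
        have hpre' : ∀ i < ts.length, (f ≤ ts.getD i 0 ∧ ts.getD i 0 < t) → i < vs.length := by
          intro i hi h
          have := hpre (i + 1) (by simpa using hi) (by simpa using h)
          simpa using this
        have ihv := ih vs hpre'
        have hshift : (List.range (x :: ts).length).filter
              (fun i => pvFilter f t ((x :: ts).getD i 0)) =
            (if pvFilter f t x then [0] else []) ++
              ((List.range ts.length).filter (fun i => pvFilter f t (ts.getD i 0))).map (· + 1) := by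
          have hstep : List.filter ((fun i => pvFilter f t ((x :: ts).getD i 0)) ∘ Nat.succ) (List.range ts.length)
              = List.filter (fun i => pvFilter f t (ts.getD i 0)) (List.range ts.length) :=
            List.filter_congr (fun i _ => by simp [Function.comp])
          have hsucc : List.map Nat.succ (List.filter (fun i => pvFilter f t (ts.getD i 0)) (List.range ts.length))
              = List.map (· + 1) (List.filter (fun i => pvFilter f t (ts.getD i 0)) (List.range ts.length)) :=
            List.map_congr_left (fun i _ => rfl)
          rw [List.length_cons, List.range_succ_eq_map, List.filter_cons, List.filter_map, hstep, hsucc]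
          simp only [List.getD_cons_zero]
          by_cases hx : pvFilter f t x <;> simp [hx]
        have hmapv : List.map ((fun i => (v :: vs).getD i 0) ∘ fun x => x + 1)
            (List.filter (fun i => pvFilter f t (ts.getD i 0)) (List.range ts.length))
            = List.map (fun i => vs.getD i 0) (List.filter (fun i => pvFilter f t (ts.getD i 0)) (List.range ts.length)) :=
          List.map_congr_left (fun i _ => by simp [Function.comp])
        rw [Prod.mk.injEq] at ihv
        obtain ⟨h1, h2⟩ := ihv
        by_cases hx : f ≤ x ∧ x < t
        · have hx' : pvFilter f t x = true := by simp [hfe, hx]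
          refine Prod.ext ?_ ?_
          · show List.filter (pvFilter f t) (x :: ts) = _
            rw [List.filter_cons_of_pos hx']
            simp [hx, h1]
          · show List.map (fun i => (v :: vs).getD i 0) _ = _
            rw [hshift, if_pos hx', List.map_append, List.map_map, hmapv, h2]
            simp [hx]
        · have hx' : pvFilter f t x = false := by
            simp only [hfe, decide_eq_false_iff_not]; exact hx
          refine Prod.ext ?_ ?_
          · show List.filter (pvFilter f t) (x :: ts) = _
            rw [List.filter_cons_of_neg (by simp [hx'])]
            simp [hx, h1]
          · show List.map (fun i => (v :: vs).getD i 0) _ = _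
            rw [hshift, if_neg (by simp [hx']), List.nil_append, List.map_map, hmapv, h2]
            simp [hx]

-- ===== VERDICT (by name: the statement is the Claim_ definition above) =====
theorem sliceByTimestamps_spec : Claim_equal_sliceByTimestamps := by
  intro ts vs f t _ hpre
  unfold Spec_sliceByTimestamps sliceByTimestamps_alt
  rw [pvA_char, pvB_char]
  simp only [List.nil_append]
  exact pvMain f t ts vs hpre
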